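-- pv_equiv track=rewrite | github.com/HanchongZ/model23 | hybrid_uni_test.py | count_collision
-- ===== SOURCE A (Python) =====
-- def count_collision(nums):
--     count = 0  # Counter for non-zero digit blocks
--     current_block = 0  # Counter for the current non-zero digit block
--
--     for num in nums:
--         if num != 0:
--             current_block += 1
--         elif current_block != 0:
--             count += 1
--             current_block = 0
--
--     # Check if there is a non-zero digit block at the end of the list
--     if current_block != 0:
--         count += 1
--
--     return count
-- ===== SOURCE B (Python) =====
-- def count_collision(nums):
--     nums = list(nums)
--     nonzeros = sum(1 for x in nums if x != 0)
--     adjacent = sum(1 for a, b in zip(nums, nums[1:]) if a != 0 and b != 0)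
--     return nonzeros - adjacent
-- ===== Notes on version B (the rewrite author's own statement) =====
-- stated objective: alternative
-- what changed: Replaces A's stateful run-tracking loop by the arithmetic identity runs = (#nonzero elements) - (#adjacent pairs with both elements nonzero): each maximal nonzero run of length k contributes k nonzeros and k-1 such pairs, so the difference counts the runs; no per-element state machine remains.
import Mathlib
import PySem

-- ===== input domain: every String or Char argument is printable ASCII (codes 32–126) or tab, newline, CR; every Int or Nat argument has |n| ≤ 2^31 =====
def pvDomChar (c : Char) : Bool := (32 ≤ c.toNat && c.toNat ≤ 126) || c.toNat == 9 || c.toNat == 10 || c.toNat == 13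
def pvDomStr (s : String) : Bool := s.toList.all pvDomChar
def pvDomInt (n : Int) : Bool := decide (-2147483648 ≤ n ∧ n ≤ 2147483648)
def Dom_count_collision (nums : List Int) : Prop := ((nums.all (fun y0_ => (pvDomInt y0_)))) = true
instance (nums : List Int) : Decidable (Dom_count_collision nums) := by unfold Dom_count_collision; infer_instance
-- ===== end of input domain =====

-- B: no run-tracking state machine — it uses the identity
-- runs = (#nonzero elements) - (#adjacent pairs with both elements nonzero).

-- ===== PORT A =====
def count_collision (nums : List Int) : Int :=
  let st := nums.foldl (fun (s : Int × Int) num =>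
    if num ≠ 0 then (s.1, s.2 + 1)
    else if s.2 ≠ 0 then (s.1 + 1, (0 : Int))
    else s) ((0 : Int), (0 : Int))
  if st.2 ≠ 0 then st.1 + 1 else st.1

-- ===== PORT B =====
def count_collision_alt (nums : List Int) : Int :=
  let nonzeros : Int := (nums.countP (fun x => decide (x ≠ 0)) : Nat)
  let adjacent : Int :=
    ((nums.zip nums.tail).countP (fun p => decide (p.1 ≠ 0) && decide (p.2 ≠ 0)) : Nat)
  nonzeros - adjacent

-- ===== PRECONDITION & SPEC =====
def Spec_count_collision (nums : List Int) (out : Int) : Prop := out = count_collision_alt nums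
instance (nums : List Int) (out : Int) : Decidable (Spec_count_collision nums out) := by unfold Spec_count_collision; infer_instance

-- ===== CLAIM (what is proved, stated in full; the proofs are below) =====
def Claim_equal_count_collision : Prop := ∀ (nums : List Int), Dom_count_collision nums → Spec_count_collision nums (count_collision nums)

-- ===== LEMMAS AND PROOFS =====

-- number of run starts in a boolean sequence, given the previous element's key
def pvStarts (prev : Bool) : List Bool → Int
  | [] => 0
  | b :: rest => (if b && !prev then 1 else 0) + pvStarts b rest

-- number of true elements
def pvOnes : List Bool → Int
  | [] => 0
  | b :: rest => (if b then 1 else 0) + pvOnes rest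

-- number of adjacent true-true pairs, given the previous element's key
def pvAdj (prev : Bool) : List Bool → Int
  | [] => 0
  | b :: rest => (if prev && b then 1 else 0) + pvAdj b rest

theorem pv_invariant (l : List Int) (count cur : Int) (h : 0 ≤ cur) :
    (let st := l.foldl (fun (s : Int × Int) num =>
        if num ≠ 0 then (s.1, s.2 + 1)
        else if s.2 ≠ 0 then (s.1 + 1, (0 : Int))
        else s) (count, cur)
     if st.2 ≠ 0 then st.1 + 1 else st.1)
    = count + (if cur ≠ 0 then 1 else 0)
      + pvStarts (decide (cur ≠ 0)) (l.map (fun x => decide (x ≠ 0))) := by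
  induction l generalizing count cur with
  | nil => simp [pvStarts]; split_ifs <;> ring
  | cons x xs ih =>
    simp only [List.foldl_cons, List.map_cons]
    by_cases hx : x ≠ 0
    · simp only [if_pos hx]
      rw [ih count (cur + 1) (by omega)]
      have h1 : (cur + 1 ≠ 0) := by omega
      simp [pvStarts, hx, h1]
      split_ifs <;> ring
    · simp only [if_neg hx]
      by_cases hc : cur ≠ 0
      · simp only [if_pos hc]
        rw [ih (count + 1) 0 (by omega)]
        simp [pvStarts, hx, hc]
      · simp only [if_neg hc]
        rw [ih count cur h]
        simp [pvStarts, hx, hc]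

theorem pv_starts_eq (l : List Bool) : ∀ prev, pvStarts prev l = pvOnes l - pvAdj prev l := by
  induction l with
  | nil => intro prev; simp [pvStarts, pvOnes, pvAdj]
  | cons b rest ih =>
    intro prev
    simp only [pvStarts, pvOnes, pvAdj, ih b]
    cases b <;> cases prev <;> simp <;> omega

theorem pv_ones_count (l : List Int) :
    ((l.countP (fun x => decide (x ≠ 0)) : Nat) : Int) = pvOnes (l.map (fun x => decide (x ≠ 0))) := by
  induction l with
  | nil => simp [pvOnes]
  | cons x xs ih =>
    have ih' := ih
    simp only [decide_not] at ih'
    by_cases hx : x ≠ 0 <;> simp [List.countP_cons, pvOnes, hx, ih'] <;> omega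

theorem pv_adj_zip (xs : List Int) : ∀ (x : Int),
    ((((x :: xs).zip xs).countP (fun p => decide (p.1 ≠ 0) && decide (p.2 ≠ 0)) : Nat) : Int)
      = pvAdj (decide (x ≠ 0)) (xs.map (fun y => decide (y ≠ 0))) := by
  induction xs with
  | nil => intro x; simp [pvAdj]
  | cons y ys ih =>
    intro x
    simp only [List.zip_cons_cons, List.countP_cons, List.map_cons, pvAdj, ← ih y]
    by_cases hx : x ≠ 0 <;> by_cases hy : y ≠ 0 <;> simp [hx, hy] <;> omega

-- ===== VERDICT (by name: the statement is the Claim_ definition above) =====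
theorem count_collision_spec : Claim_equal_count_collision := by
  intro nums _
  unfold Spec_count_collision count_collision count_collision_alt
  have hA := pv_invariant nums 0 0 le_rfl
  simp only [show (decide ((0:Int) ≠ 0)) = false by decide, if_neg (by omega : ¬ (0:Int) ≠ 0),
    add_zero, zero_add] at hA
  rw [hA, pv_starts_eq, pv_ones_count]
  cases nums with
  | nil => simp [pvAdj]
  | cons x xs =>
    simp only [List.tail_cons, pv_adj_zip xs x, List.map_cons, pvAdj]
    cases hb : decide (x ≠ 0) <;> simp
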